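-- pv_equiv track=rewrite | github.com/filipetorresdecarvalho/OpenCodeImdbApiCacheUI | utils/schema_mapper.py | _paths_match
-- ===== SOURCE A (Python) =====
-- def _paths_match(template: str, actual: str) -> bool:
--     template_parts = template.strip("/").split("/")
--     actual_parts = actual.strip("/").split("/")
--     if len(template_parts) != len(actual_parts):
--         return False
--     for t, a in zip(template_parts, actual_parts):
--         if t.startswith("{") and t.endswith("}"):
--             continue
--         if t != a:
--             return False
--     return True
-- ===== SOURCE B (Python) =====
-- def _paths_match(template: str, actual: str) -> bool:
--     def seg_ok(t, a):
--         return (t.startswith("{") and t.endswith("}")) or t == a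
--
--     def go(t, a):
--         t_head, t_sep, t_rest = t.partition("/")
--         a_head, a_sep, a_rest = a.partition("/")
--         if not seg_ok(t_head, a_head):
--             return False
--         if t_sep != a_sep:
--             return False
--         if not t_sep:
--             return True
--         return go(t_rest, a_rest)
--
--     return go(template.strip("/"), actual.strip("/"))
-- ===== Notes on version B (the rewrite author's own statement) =====
-- stated objective: alternative
-- what changed: B replaces A's strip/split/len-check/zip-loop over prebuilt segment lists by a single recursive descent that peels one segment off each string with str.partition('/') and compares as it goes (the length check falls out of comparing the partition separators).
import Mathlib
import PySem

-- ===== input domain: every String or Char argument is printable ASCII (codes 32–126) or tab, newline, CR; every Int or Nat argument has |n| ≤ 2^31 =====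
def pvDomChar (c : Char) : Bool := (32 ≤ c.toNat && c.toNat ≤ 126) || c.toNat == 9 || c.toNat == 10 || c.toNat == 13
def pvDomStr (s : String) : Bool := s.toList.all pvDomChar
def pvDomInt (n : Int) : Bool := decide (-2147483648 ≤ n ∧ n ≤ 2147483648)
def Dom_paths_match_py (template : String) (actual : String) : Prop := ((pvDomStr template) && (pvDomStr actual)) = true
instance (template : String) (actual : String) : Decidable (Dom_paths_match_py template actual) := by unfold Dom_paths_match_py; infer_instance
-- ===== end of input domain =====

-- B peels one '/'-separated segment at a time with partition instead of A's split/len/zip; same result, alternative decomposition.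

-- ===== PORT A =====
-- the for-loop over zip(template_parts, actual_parts) with continue / early return False
def pvALoop : List (List Char × List Char) → Bool
  | [] => true
  | (t, a) :: rest =>
    if PySem.Chars.startswith t ['{'] && PySem.Chars.endswith t ['}'] then pvALoop rest
    else if t ≠ a then false
    else pvALoop rest

def paths_match_py (template : String) (actual : String) : Bool :=
  let template_parts := PySem.Chars.splitOn (PySem.Chars.stripChars template.toList ['/']) ['/']
  let actual_parts := PySem.Chars.splitOn (PySem.Chars.stripChars actual.toList ['/']) ['/']
  if template_parts.length ≠ actual_parts.length then false
  else pvALoop (template_parts.zip actual_parts)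

-- ===== PORT B =====
-- s.partition("/") : (head, matched?) where matched? = some rest iff a '/' occurs (the separator string is '/' exactly then)
def pvPartSlash : List Char → List Char × Option (List Char)
  | [] => ([], none)
  | c :: cs =>
    if c = '/' then ([], some cs)
    else
      let p := pvPartSlash cs
      (c :: p.1, p.2)

lemma pvPartSlash_some_lt : ∀ (l r : List Char), (pvPartSlash l).2 = some r → r.length < l.length := by
  intro l
  induction l with
  | nil => intro r h; simp [pvPartSlash] at h
  | cons c cs ih =>
    intro r h
    by_cases hc : c = '/'
    · simp [pvPartSlash, hc] at h
      subst h; simp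
    · simp [pvPartSlash, hc] at h
      have := ih r h
      simp; omega

def pvSegOk (t a : List Char) : Bool :=
  (PySem.Chars.startswith t ['{'] && PySem.Chars.endswith t ['}']) || t == a

def pvGo (t a : List Char) : Bool :=
  match _ht : (pvPartSlash t).2, (pvPartSlash a).2 with
  | none, none => pvSegOk (pvPartSlash t).1 (pvPartSlash a).1
  | some tr, some ar => pvSegOk (pvPartSlash t).1 (pvPartSlash a).1 && pvGo tr ar
  | none, some _ => false
  | some _, none => false
termination_by t.length
decreasing_by exact pvPartSlash_some_lt t tr _ht

def paths_match_py_alt (template : String) (actual : String) : Bool :=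
  pvGo (PySem.Chars.stripChars template.toList ['/']) (PySem.Chars.stripChars actual.toList ['/'])

-- ===== PRECONDITION & SPEC =====
def Spec_paths_match_py (template : String) (actual : String) (out : Bool) : Prop := out = paths_match_py_alt template actual
instance (template : String) (actual : String) (out : Bool) : Decidable (Spec_paths_match_py template actual out) := by unfold Spec_paths_match_py; infer_instance

-- ===== CLAIM (what is proved, stated in full; the proofs are below) =====
def Claim_equal_paths_match_py : Prop := ∀ (template : String) (actual : String), Dom_paths_match_py template actual → Spec_paths_match_py template actual (paths_match_py template actual)

-- ===== LEMMAS AND PROOFS =====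

-- split("/") as the recursion pvGo follows: head segment, then split of the rest
def pvSplit (l : List Char) : List (List Char) :=
  match _h : (pvPartSlash l).2 with
  | none => [(pvPartSlash l).1]
  | some r => (pvPartSlash l).1 :: pvSplit r
termination_by l.length
decreasing_by exact pvPartSlash_some_lt l r _h

lemma pvSplit_none {l : List Char} (h : (pvPartSlash l).2 = none) :
    pvSplit l = [(pvPartSlash l).1] := by
  conv_lhs => rw [pvSplit.eq_def]
  split <;> simp_all

lemma pvSplit_some {l r : List Char} (h : (pvPartSlash l).2 = some r) :
    pvSplit l = (pvPartSlash l).1 :: pvSplit r := by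
  conv_lhs => rw [pvSplit.eq_def]
  split <;> simp_all

lemma pvSplit_ne_nil (l : List Char) : pvSplit l ≠ [] := by
  rcases h : (pvPartSlash l).2 with _ | r
  · rw [pvSplit_none h]; simp
  · rw [pvSplit_some h]; simp

lemma pvSplit_cons_headI_tail (l : List Char) :
    (pvSplit l).headI :: (pvSplit l).tail = pvSplit l := by
  have h := pvSplit_ne_nil l
  cases hh : pvSplit l with
  | nil => exact absurd hh h
  | cons a t => rfl

lemma pvSplit_nil : pvSplit [] = [[]] := by
  rw [pvSplit_none (by rfl)]; rfl

lemma pvSplit_cons_slash (rest : List Char) :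
    pvSplit ('/' :: rest) = [] :: pvSplit rest := by
  have h2 : (pvPartSlash ('/' :: rest)).2 = some rest := by simp [pvPartSlash]
  rw [pvSplit_some h2]; simp [pvPartSlash]

lemma pvSplit_cons_ne {c : Char} (rest : List Char) (hc : ¬ c = '/') :
    pvSplit (c :: rest) = (c :: (pvSplit rest).headI) :: (pvSplit rest).tail := by
  have hp : pvPartSlash (c :: rest) = (c :: (pvPartSlash rest).1, (pvPartSlash rest).2) := by
    simp [pvPartSlash, hc]
  rcases h : (pvPartSlash rest).2 with _ | r
  · have h2 : (pvPartSlash (c :: rest)).2 = none := by rw [hp]; exact h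
    rw [pvSplit_none h2, pvSplit_none h, hp]
    simp
  · have h2 : (pvPartSlash (c :: rest)).2 = some r := by rw [hp]; exact h
    rw [pvSplit_some h2, pvSplit_some h, hp]
    simp

lemma go_inv : ∀ (fuel : Nat) (l cur : List Char) (accs : List (List Char)),
    l.length < fuel →
    PySem.Chars.splitOn.go ['/'] fuel l cur accs
      = accs.reverse ++ ((cur.reverse ++ (pvSplit l).headI) :: (pvSplit l).tail) := by
  intro fuel
  induction fuel with
  | zero => intro l cur accs h; omega
  | succ f ih =>
    intro l cur accs h
    cases l with
    | nil =>
      simp [PySem.Chars.splitOn.go, pvSplit_nil]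
    | cons c rest =>
      by_cases hc : c = '/'
      · subst hc
        have hstep : PySem.Chars.splitOn.go ['/'] (f + 1) ('/' :: rest) cur accs
            = PySem.Chars.splitOn.go ['/'] f rest [] (cur.reverse :: accs) := by
          simp [PySem.Chars.splitOn.go, List.isPrefixOf]
        rw [hstep, ih rest [] (cur.reverse :: accs) (by simp at h; omega),
            pvSplit_cons_slash]
        simp [pvSplit_cons_headI_tail]
      · have hstep : PySem.Chars.splitOn.go ['/'] (f + 1) (c :: rest) cur accs
            = PySem.Chars.splitOn.go ['/'] f rest (c :: cur) accs := by
          have h' : ¬ ('/' = c) := fun hce => hc hce.symm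
          simp [PySem.Chars.splitOn.go, List.isPrefixOf, h']
        rw [hstep, ih rest (c :: cur) accs (by simp at h; omega),
            pvSplit_cons_ne rest hc]
        simp

lemma splitOn_eq_pvSplit (l : List Char) : PySem.Chars.splitOn l ['/'] = pvSplit l := by
  unfold PySem.Chars.splitOn
  rw [go_inv (l.length + 1) l [] [] (by omega)]
  simpa using pvSplit_cons_headI_tail l

lemma pvALoop_cons (t a : List Char) (z : List (List Char × List Char)) :
    pvALoop ((t, a) :: z) = (pvSegOk t a && pvALoop z) := by
  by_cases h1 : (PySem.Chars.startswith t ['{'] && PySem.Chars.endswith t ['}']) = true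
  · simp [pvALoop, pvSegOk, h1]
  · by_cases h2 : t = a <;> simp [pvALoop, pvSegOk, h1, h2]

lemma pvGo_nn {t a : List Char} (ht : (pvPartSlash t).2 = none)
    (ha : (pvPartSlash a).2 = none) :
    pvGo t a = pvSegOk (pvPartSlash t).1 (pvPartSlash a).1 := by
  rw [pvGo.eq_def]; split <;> simp_all

lemma pvGo_ss {t a tr ar : List Char} (ht : (pvPartSlash t).2 = some tr)
    (ha : (pvPartSlash a).2 = some ar) :
    pvGo t a = (pvSegOk (pvPartSlash t).1 (pvPartSlash a).1 && pvGo tr ar) := by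
  rw [pvGo.eq_def]; split <;> simp_all

lemma pvGo_ns {t a ar : List Char} (ht : (pvPartSlash t).2 = none)
    (ha : (pvPartSlash a).2 = some ar) :
    pvGo t a = false := by
  rw [pvGo.eq_def]; split <;> simp_all

lemma pvGo_sn {t a tr : List Char} (ht : (pvPartSlash t).2 = some tr)
    (ha : (pvPartSlash a).2 = none) :
    pvGo t a = false := by
  rw [pvGo.eq_def]; split <;> simp_all

lemma pvGo_eq (t a : List Char) :
    pvGo t a = (if (pvSplit t).length = (pvSplit a).length
                then pvALoop ((pvSplit t).zip (pvSplit a)) else false) := by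
  induction ht : t.length using Nat.strong_induction_on generalizing t a with
  | _ n ih =>
    subst ht
    rcases h1 : (pvPartSlash t).2 with _ | tr <;> rcases h2 : (pvPartSlash a).2 with _ | ar
    · rw [pvGo_nn h1 h2, pvSplit_none h1, pvSplit_none h2]
      simp [pvALoop_cons, pvALoop]
    · rw [pvGo_ns h1 h2, pvSplit_none h1, pvSplit_some h2]
      rw [if_neg (by simp [pvSplit_ne_nil ar])]
    · rw [pvGo_sn h1 h2, pvSplit_some h1, pvSplit_none h2]
      rw [if_neg (by simp [pvSplit_ne_nil tr])]
    · rw [pvGo_ss h1 h2, pvSplit_some h1, pvSplit_some h2,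
          ih tr.length (pvPartSlash_some_lt t tr h1) tr ar rfl]
      by_cases hl : (pvSplit tr).length = (pvSplit ar).length
      · simp [hl, pvALoop_cons]
      · simp [hl]

-- ===== VERDICT (by name: the statement is the Claim_ definition above) =====
theorem paths_match_py_spec : Claim_equal_paths_match_py := by
  intro template actual _
  unfold Spec_paths_match_py paths_match_py paths_match_py_alt
  rw [splitOn_eq_pvSplit, splitOn_eq_pvSplit, pvGo_eq]
  split_ifs with h1 <;> simp_all
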